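-- pv_equiv track=rewrite | github.com/aashaanX/Pycodes | mansa.py | func
-- ===== SOURCE A (Python) =====
-- def func(n,a,b):
-- 	i=0
-- 	temp=[]
-- 	while n>=0:
-- 		ans = a*n+b*i
-- 		i+=1
-- 		n-=1
-- 		temp.append(ans)
-- 	return sorted(set(temp))
-- ===== SOURCE B (Python) =====
-- def func(n, a, b):
--     # values are a*n + k*(b - a) for k = 0..n: an arithmetic progression,
--     # emitted in sorted order directly (collapsed to one value when a == b).
--     if n < 0:
--         return []
--     d = b - a
--     if d == 0:
--         return [a * n]
--     ks = range(n + 1) if d > 0 else reversed(range(n + 1))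
--     return [a * n + k * d for k in ks]
-- ===== Notes on version B (the rewrite author's own statement) =====
-- stated objective: faster
-- what changed: B replaces the append loop plus sorted(set(...)) by the closed-form arithmetic progression a*n + k*(b-a), emitted directly in sorted order (one value when a == b, ascending when b > a, reversed when b < a).
import Mathlib
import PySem

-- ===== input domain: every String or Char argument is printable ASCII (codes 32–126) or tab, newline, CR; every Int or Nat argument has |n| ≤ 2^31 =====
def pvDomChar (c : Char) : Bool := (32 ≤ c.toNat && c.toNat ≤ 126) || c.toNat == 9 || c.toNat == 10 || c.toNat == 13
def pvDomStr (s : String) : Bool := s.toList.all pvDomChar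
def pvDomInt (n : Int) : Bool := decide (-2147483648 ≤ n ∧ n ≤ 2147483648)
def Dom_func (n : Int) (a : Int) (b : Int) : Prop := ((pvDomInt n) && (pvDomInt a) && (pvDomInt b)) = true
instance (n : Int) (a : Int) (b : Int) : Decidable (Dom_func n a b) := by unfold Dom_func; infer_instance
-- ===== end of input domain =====

-- B computes the closed-form arithmetic progression a*n + k*(b-a) in sorted order directly,
-- avoiding A's list building, set and sort (objective: faster, constant factor).

-- ===== PORT A =====
-- the while loop: state (n, i, temp), fuel (n+1).toNat bounds the number of iterations exactly
def funcLoop (a b : Int) : Int → Int → List Int → Nat → List Int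
  | _, _, temp, 0 => temp
  | n, i, temp, fuel + 1 =>
    if n ≥ 0 then funcLoop a b (n - 1) (i + 1) (temp ++ [a * n + b * i]) fuel else temp

def func (n : Int) (a : Int) (b : Int) : List Int :=
  PySem.List.sorted (PySem.Set.ofList (funcLoop a b n 0 [] (n + 1).toNat)) (fun x => x) false

-- ===== PORT B =====
def func_alt (n : Int) (a : Int) (b : Int) : List Int :=
  if n < 0 then []
  else
    let d := b - a
    if d = 0 then [a * n]
    else
      let ks := if d > 0 then PySem.List.pyRange 0 (n + 1) 1
                else (PySem.List.pyRange 0 (n + 1) 1).reverse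
      ks.map (fun k => a * n + k * d)

-- ===== PRECONDITION & SPEC =====
def Spec_func (n : Int) (a : Int) (b : Int) (out : List Int) : Prop := out = func_alt n a b
instance (n : Int) (a : Int) (b : Int) (out : List Int) : Decidable (Spec_func n a b out) := by unfold Spec_func; infer_instance

-- ===== CLAIM (what is proved, stated in full; the proofs are below) =====
def Claim_equal_func : Prop := ∀ (n : Int) (a : Int) (b : Int), Dom_func n a b → Spec_func n a b (func n a b)

-- ===== LEMMAS AND PROOFS =====

-- the loop produces temp ++ [a*(n-j) + b*(i+j) for j in 0..n]
theorem funcLoop_spec (a b : Int) : ∀ (fuel : Nat) (n i : Int) (temp : List Int),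
    n + 1 ≤ fuel →
    funcLoop a b n i temp fuel
      = temp ++ (List.range (n + 1).toNat).map
          (fun j : Nat => a * (n - (j : Int)) + b * (i + (j : Int))) := by
  intro fuel
  induction fuel with
  | zero =>
    intro n i temp h
    have hn : (n + 1).toNat = 0 := by omega
    simp [funcLoop, hn]
  | succ f ih =>
    intro n i temp h
    by_cases hn : n ≥ 0
    · have hle : (n - 1) + 1 ≤ (f : Int) := by omega
      have hnt : (n + 1).toNat = n.toNat + 1 := by omega
      rw [funcLoop, if_pos hn, ih _ _ _ hle, hnt, List.range_succ_eq_map]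
      have hnt2 : (n - 1 + 1).toNat = n.toNat := by omega
      simp only [hnt2, List.map_cons, List.map_map, List.append_assoc, List.cons_append,
        List.nil_append]
      congr 1
      · congr 1
        · push_cast; ring_nf
        · apply List.map_congr_left
          intro j _
          simp only [Function.comp]
          push_cast; ring_nf
    · rw [funcLoop, if_neg hn]
      have hnt : (n + 1).toNat = 0 := by omega
      simp [hnt]

theorem ofList_eq_self (xs : List Int) (h : xs.Nodup) : PySem.Set.ofList xs = xs := by
  have key : ∀ (l s : List Int), (s ++ l).Nodup → l.foldl PySem.Set.add s = s ++ l := by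
    intro l
    induction l with
    | nil => intro s _; simp
    | cons x t ih =>
      intro s hs
      have hx : x ∉ s := by
        simp [List.nodup_append] at hs
        intro hmem
        exact (hs.2.2 x hmem).1 rfl
      have : PySem.Set.add s x = s ++ [x] := by
        simp [PySem.Set.add, PySem.Set.contains, hx]
      rw [List.foldl_cons, this, ih]
      · simp
      · simpa using hs
  simpa using key xs [] (by simpa using h)

theorem foldl_add_mem (x : Int) : ∀ (k : Nat) (s : List Int), x ∈ s →
    (List.replicate k x).foldl PySem.Set.add s = s := by
  intro k
  induction k with
  | zero => intro s _; simp
  | succ m ih =>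
    intro s hx
    have : PySem.Set.add s x = s := by
      simp [PySem.Set.add, PySem.Set.contains, hx]
    rw [List.replicate_succ, List.foldl_cons, this, ih s hx]

theorem temp_eq (n a b : Int) :
    funcLoop a b n 0 [] (n + 1).toNat
      = (List.range (n + 1).toNat).map (fun j : Nat => a * n + (j : Int) * (b - a)) := by
  rw [funcLoop_spec a b _ n 0 [] (Int.self_le_toNat (n + 1))]
  simp only [List.nil_append]
  apply List.map_congr_left
  intro j _
  ring

theorem pairwise_lt_prog (m : Nat) (c d : Int) (hd : 0 < d) :
    ((List.range m).map (fun j : Nat => c + (j : Int) * d)).Pairwise (· < ·) := by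
  rw [List.pairwise_map]
  exact List.pairwise_lt_range.imp (fun h => by
    have : ((_ : Nat) : Int) < _ := Int.ofNat_lt.mpr h
    have := mul_lt_mul_of_pos_right this hd
    omega)

theorem pairwise_gt_prog (m : Nat) (c d : Int) (hd : d < 0) :
    ((List.range m).map (fun j : Nat => c + (j : Int) * d)).Pairwise (fun x y => y < x) := by
  rw [List.pairwise_map]
  exact List.pairwise_lt_range.imp (fun h => by
    have : ((_ : Nat) : Int) < _ := Int.ofNat_lt.mpr h
    have := mul_lt_mul_of_neg_right this hd
    omega)

theorem alt_range_eq (n a b : Int) :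
    (PySem.List.pyRange 0 (n + 1) 1).map (fun k => a * n + k * (b - a))
      = (List.range (n + 1).toNat).map (fun j : Nat => a * n + (j : Int) * (b - a)) := by
  rw [PySem.List.pyRange_one]
  simp only [List.map_map, Int.sub_zero]
  apply List.map_congr_left
  intro j _
  simp [Function.comp]

-- ===== VERDICT (by name: the statement is the Claim_ definition above) =====
theorem func_spec : Claim_equal_func := by
  intro n a b _
  show func n a b = func_alt n a b
  unfold func func_alt
  rw [temp_eq]
  by_cases hn : n < 0
  · have hm : (n + 1).toNat = 0 := by omega
    simp [hm, hn, PySem.Set.ofList, PySem.List.sorted]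
  · rw [if_neg hn]
    by_cases hd0 : b - a = 0
    · -- constant progression: set collapses to the single value a*n
      rw [if_pos hd0]
      have hm : (n + 1).toNat = n.toNat + 1 := by omega
      have hconst : (List.range (n + 1).toNat).map (fun j : Nat => a * n + (j : Int) * (b - a))
          = List.replicate (n + 1).toNat (a * n) := by
        rw [List.eq_replicate_iff]
        constructor
        · simp
        · intro y hy
          obtain ⟨j, _, rfl⟩ := List.mem_map.mp hy
          rw [hd0]; ring
      rw [hconst, hm, List.replicate_succ]
      have : PySem.Set.ofList (a * n :: List.replicate n.toNat (a * n)) = [a * n] := by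
        show (a * n :: List.replicate n.toNat (a * n)).foldl PySem.Set.add [] = [a * n]
        rw [List.foldl_cons]
        have h1 : PySem.Set.add [] (a * n) = [a * n] := by
          simp [PySem.Set.add, PySem.Set.contains]
        rw [h1, foldl_add_mem _ _ _ (by simp)]
      rw [this]
      exact PySem.List.sorted_eq_self_of_pairwise _ _ (List.pairwise_singleton _ _)
    · rw [if_neg hd0]
      by_cases hd : 0 < b - a
      · -- increasing progression: already sorted, no duplicates
        rw [if_pos hd, alt_range_eq]
        have hp := pairwise_lt_prog (n + 1).toNat (a * n) (b - a) hd
        rw [ofList_eq_self _ (hp.imp (fun h => ne_of_lt h))]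
        exact PySem.List.sorted_eq_self_of_pairwise _ _ (hp.imp (fun h => le_of_lt h))
      · -- decreasing progression: the sorted result is the reverse
        rw [if_neg hd, List.map_reverse, alt_range_eq]
        have hd' : b - a < 0 := by omega
        have hp := pairwise_gt_prog (n + 1).toNat (a * n) (b - a) hd'
        rw [ofList_eq_self _ (hp.imp (fun h => ne_of_gt h))]
        apply PySem.List.sorted_eq_of_perm_of_pairwise_lt
        · exact (List.reverse_perm _)
        · exact List.pairwise_reverse.mpr hp
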